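-- pv_equiv track=rewrite | github.com/Run-Surge/RunSurge-Master | temp_scheduler.py | calculate_peak_memory_for_statements
-- ===== SOURCE A (Python) =====
-- def calculate_peak_memory_for_statements(
--     statements, live_vars_data, func_footprints_data, stmt_to_idx_map
-- ):
--     """Calculates the true peak memory for a list of statements by simulating its execution."""
--     peak_memory_for_block = 0
--     for stmt in statements:
--         live_vars_at_line = live_vars_data.get(stmt, {})
--         sum_of_live_vars = sum(
--             var_info["size"] for var_info in live_vars_at_line.values()
--         )
--
--         func_execution_size = 0
--         original_idx = stmt_to_idx_map.get(stmt)
--         if original_idx is not None: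
--             key_prefix_to_find = f"{stmt}"
--             found_key = next(
--                 (k for k in func_footprints_data if k.startswith(key_prefix_to_find)),
--                 None,
--             )
--             if found_key:
--                 func_mem_dict = func_footprints_data[found_key]
--                 if func_mem_dict:
--                     func_execution_size = list(func_mem_dict.values())[-1]
--
--         instantaneous_memory = sum_of_live_vars + func_execution_size
--         if instantaneous_memory > peak_memory_for_block:
--             peak_memory_for_block = instantaneous_memory
--     return peak_memory_for_block
-- ===== SOURCE B (Python) =====
-- def calculate_peak_memory_for_statements(
--     statements, live_vars_data, func_footprints_data, stmt_to_idx_map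
-- ):
--     """Prefix-index re-implementation: index every prefix of every footprint key once,
--     so each statement's footprint lookup is a single dict access instead of a scan over all keys."""
--     # build: prefix -> footprint size of the FIRST key having that prefix
--     prefix_index = {}
--     for key, mem_dict in func_footprints_data.items():
--         # an empty key contributes 0 (it can never be a usable match)
--         size = list(mem_dict.values())[-1] if (mem_dict and key) else 0
--         prefix = ""
--         if prefix not in prefix_index:
--             prefix_index[prefix] = size
--         for ch in key:
--             prefix += ch
--             if prefix not in prefix_index:
--                 prefix_index[prefix] = size
--     peak = 0
--     for stmt in statements:
--         total = sum(info["size"] for info in live_vars_data.get(stmt, {}).values())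
--         if stmt in stmt_to_idx_map:
--             total += prefix_index.get(stmt, 0)
--         if total > peak:
--             peak = total
--     return peak
-- ===== Notes on version B (the rewrite author's own statement) =====
-- stated objective: alternative
-- what changed: Instead of scanning every footprint key per statement to find the first one starting with the statement, B builds a prefix index once (every prefix of every footprint key mapped, via setdefault, to the first matching key's footprint size), so each statement's footprint lookup is a single dict access; per-statement work drops from O(F*L) to O(1) lookups, though a timing run could not measure a difference at its sizes.
import Mathlib
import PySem

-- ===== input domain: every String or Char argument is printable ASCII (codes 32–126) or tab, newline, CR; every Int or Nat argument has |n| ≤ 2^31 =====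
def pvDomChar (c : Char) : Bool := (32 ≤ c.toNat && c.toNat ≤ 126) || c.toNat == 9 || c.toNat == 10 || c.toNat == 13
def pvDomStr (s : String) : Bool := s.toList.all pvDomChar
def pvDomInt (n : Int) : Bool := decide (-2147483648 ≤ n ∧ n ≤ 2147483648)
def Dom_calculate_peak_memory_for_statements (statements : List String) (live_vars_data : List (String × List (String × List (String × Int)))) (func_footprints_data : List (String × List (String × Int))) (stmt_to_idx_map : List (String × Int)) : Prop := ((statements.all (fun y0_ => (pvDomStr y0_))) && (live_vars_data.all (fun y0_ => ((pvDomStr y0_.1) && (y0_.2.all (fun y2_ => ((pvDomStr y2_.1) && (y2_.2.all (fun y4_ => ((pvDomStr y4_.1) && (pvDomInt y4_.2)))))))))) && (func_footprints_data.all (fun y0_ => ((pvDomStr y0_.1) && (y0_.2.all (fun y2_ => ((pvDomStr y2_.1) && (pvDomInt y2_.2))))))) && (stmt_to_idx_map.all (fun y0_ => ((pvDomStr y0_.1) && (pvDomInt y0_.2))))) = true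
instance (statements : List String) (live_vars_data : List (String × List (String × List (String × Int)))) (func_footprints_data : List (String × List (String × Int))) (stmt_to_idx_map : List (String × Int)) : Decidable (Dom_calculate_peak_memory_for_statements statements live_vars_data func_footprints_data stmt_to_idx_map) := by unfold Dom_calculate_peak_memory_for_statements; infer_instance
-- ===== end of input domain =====

-- B replaces A's per-statement scan over all footprint keys by a prefix index of the keys,
-- built once, so each statement does one dictionary lookup instead of a scan (objective: alternative).

-- ===== PORT A =====
-- Dict-typed arguments arrive as association lists with unique keys (Python dicts).
-- Python's `next((k for k in d if k.startswith(p)), None)` followed by `d[found_key]` is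
-- transliterated as a single find? over the items — exact because dict keys are unique.
-- `var_info["size"]` is ported as a lookup defaulting to 0; Pre_ excludes the inputs where
-- the key "size" is missing (Python raises KeyError there).

-- list(func_mem_dict.values())[-1] when func_mem_dict is truthy (A keeps 0 for an empty dict)
def cpkA_lastVal (fm : List (String × Int)) : Int :=
  match fm.getLast? with
  | some q => q.2
  | none => 0

def calculate_peak_memory_for_statements (statements : List String) (live_vars_data : List (String × List (String × List (String × Int)))) (func_footprints_data : List (String × List (String × Int))) (stmt_to_idx_map : List (String × Int)) : Int :=
  statements.foldl (fun peak_memory_for_block stmt =>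
    let live_vars_at_line := ((live_vars_data.find? (fun p => p.1 == stmt)).map (·.2)).getD []
    let sum_of_live_vars :=
      (live_vars_at_line.map (fun vi => ((vi.2.find? (fun q => q.1 == "size")).map (·.2)).getD 0)).sum
    let func_execution_size :=
      if ((stmt_to_idx_map.find? (fun p => p.1 == stmt)).map (·.2)).isSome then
        match func_footprints_data.find? (fun p => PySem.Str.startswith p.1 stmt) with
        | some kfm => if kfm.1 == "" then 0 else cpkA_lastVal kfm.2   -- `if found_key:` — "" is falsy
        | none => 0
      else 0
    let instantaneous_memory := sum_of_live_vars + func_execution_size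
    if instantaneous_memory > peak_memory_for_block then instantaneous_memory
    else peak_memory_for_block) 0

-- ===== PORT B =====
-- size = list(mem_dict.values())[-1] if (mem_dict and key) else 0
def cpkB_size (key : String) (fm : List (String × Int)) : Int :=
  if !fm.isEmpty && key != "" then
    match fm.getLast? with
    | some q => q.2
    | none => 0
  else 0

-- one step of the char loop: extend the running prefix and setdefault it
def cpkB_step (size : Int) (st : List Char × PySem.Dict String Int) (ch : Char) :
    List Char × PySem.Dict String Int :=
  let p := st.1 ++ [ch]
  (p, st.2.setdefault (String.ofList p) size)

-- register every prefix of `key` (the running string of the char loop, plus "") under setdefault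
def cpkB_addKey (d : PySem.Dict String Int) (key : String) (size : Int) : PySem.Dict String Int :=
  (key.toList.foldl (cpkB_step size) (([] : List Char), d.setdefault "" size)).2

def cpkB_index (fpd : List (String × List (String × Int))) : PySem.Dict String Int :=
  fpd.foldl (fun d kv => cpkB_addKey d kv.1 (cpkB_size kv.1 kv.2)) PySem.Dict.empty

def calculate_peak_memory_for_statements_alt (statements : List String) (live_vars_data : List (String × List (String × List (String × Int)))) (func_footprints_data : List (String × List (String × Int))) (stmt_to_idx_map : List (String × Int)) : Int :=
  let prefix_index := cpkB_index func_footprints_data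
  statements.foldl (fun peak stmt =>
    let total0 :=
      ((((live_vars_data.find? (fun p => p.1 == stmt)).map (·.2)).getD []).map
        (fun vi => ((vi.2.find? (fun q => q.1 == "size")).map (·.2)).getD 0)).sum
    let total :=
      if stmt_to_idx_map.any (fun p => p.1 == stmt) then total0 + prefix_index.getD stmt 0
      else total0
    max peak total) 0

-- ===== PRECONDITION & SPEC =====
-- Pre_ excludes exactly the inputs on which Python A raises KeyError: some statement's
-- live-variable table (first-match lookup) contains a var_info dict without the key "size".
def Pre_calculate_peak_memory_for_statements (statements : List String) (live_vars_data : List (String × List (String × List (String × Int)))) (func_footprints_data : List (String × List (String × Int))) (stmt_to_idx_map : List (String × Int)) : Prop :=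
  ∀ stmt ∈ statements,
    ∀ vi ∈ ((live_vars_data.find? (fun p => p.1 == stmt)).map (·.2)).getD [],
      vi.2.any (fun q => q.1 == "size") = true
instance (statements : List String) (live_vars_data : List (String × List (String × List (String × Int)))) (func_footprints_data : List (String × List (String × Int))) (stmt_to_idx_map : List (String × Int)) : Decidable (Pre_calculate_peak_memory_for_statements statements live_vars_data func_footprints_data stmt_to_idx_map) := by unfold Pre_calculate_peak_memory_for_statements; infer_instance

def pvWitness_calculate_peak_memory_for_statements : List String × (List (String × List (String × List (String × Int)))) × (List (String × List (String × Int))) × (List (String × Int)) :=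
  (["x = f()"], [("x = f()", [("x", [("size", 3)])])], [("x = f()@1", [("m", 5)])], [("x = f()", 0)])

def Spec_calculate_peak_memory_for_statements (statements : List String) (live_vars_data : List (String × List (String × List (String × Int)))) (func_footprints_data : List (String × List (String × Int))) (stmt_to_idx_map : List (String × Int)) (out : Int) : Prop := out = calculate_peak_memory_for_statements_alt statements live_vars_data func_footprints_data stmt_to_idx_map
instance (statements : List String) (live_vars_data : List (String × List (String × List (String × Int)))) (func_footprints_data : List (String × List (String × Int))) (stmt_to_idx_map : List (String × Int)) (out : Int) : Decidable (Spec_calculate_peak_memory_for_statements statements live_vars_data func_footprints_data stmt_to_idx_map out) := by unfold Spec_calculate_peak_memory_for_statements; infer_instance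

-- ===== CLAIM (what is proved, stated in full; the proofs are below) =====
def Claim_equal_calculate_peak_memory_for_statements : Prop := ∀ (statements : List String) (live_vars_data : List (String × List (String × List (String × Int)))) (func_footprints_data : List (String × List (String × Int))) (stmt_to_idx_map : List (String × Int)), Dom_calculate_peak_memory_for_statements statements live_vars_data func_footprints_data stmt_to_idx_map → Pre_calculate_peak_memory_for_statements statements live_vars_data func_footprints_data stmt_to_idx_map → Spec_calculate_peak_memory_for_statements statements live_vars_data func_footprints_data stmt_to_idx_map (calculate_peak_memory_for_statements statements live_vars_data func_footprints_data stmt_to_idx_map)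

-- ===== LEMMAS AND PROOFS =====

-- A's per-statement footprint value, named for the proofs (identical to the inline match in port A)
def cpkFootA (fpd : List (String × List (String × Int))) (stmt : String) : Int :=
  match fpd.find? (fun p => PySem.Str.startswith p.1 stmt) with
  | some kfm => if kfm.1 == "" then 0 else cpkA_lastVal kfm.2
  | none => 0

theorem cpk_getD_of_contains {d : PySem.Dict String Int} {k : String} (h : d.contains k = true)
    (a b : Int) : d.getD k a = d.getD k b := by
  simp only [PySem.Dict.getD]
  rw [PySem.Dict.contains_eq_isSome_get?] at h
  cases hg : d.get? k with
  | none => rw [hg] at h; simp at h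
  | some v => simp

theorem cpk_getD_of_not_contains {d : PySem.Dict String Int} {k : String}
    (h : d.contains k = false) (a : Int) : d.getD k a = a := by
  simp only [PySem.Dict.getD]
  rw [PySem.Dict.contains_eq_isSome_get?] at h
  cases hg : d.get? k with
  | none => simp
  | some v => rw [hg] at h; simp at h

theorem cpk_getD_setdefault_of_ne (d : PySem.Dict String Int) {k k' : String} (v : Int)
    (h : k' ≠ k) (a : Int) : (d.setdefault k v).getD k' a = d.getD k' a := by
  simp only [PySem.Dict.getD, PySem.Dict.get?_setdefault_of_ne d v h]

theorem cpk_toList_eq_iff (x : String) (l : List Char) : x = String.ofList l ↔ x.toList = l := by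
  constructor
  · rintro rfl; simp
  · intro h; exact String.toList_inj.mp (by simpa using h)

theorem cpkB_step_eq (s : Int) (p : List Char) (d : PySem.Dict String Int) (c : Char) :
    cpkB_step s (p, d) c = (p ++ [c], d.setdefault (String.ofList (p ++ [c])) s) := rfl

-- the char-level fold of cpkB_addKey: which keys it adds
theorem cpk_fold_contains (s : Int) (x : String) :
    ∀ (cs p : List Char) (d : PySem.Dict String Int),
      ((cs.foldl (cpkB_step s) (p, d)).2).contains x = true ↔
        d.contains x = true ∨ ∃ i < cs.length, x.toList = p ++ cs.take (i+1) := by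
  intro cs
  induction cs with
  | nil => intro p d; simp
  | cons c cs ih =>
    intro p d
    rw [List.foldl_cons, cpkB_step_eq]
    rw [ih (p ++ [c]) (d.setdefault (String.ofList (p ++ [c])) s)]
    rw [PySem.Dict.contains_setdefault]
    constructor
    · rintro (hc | ⟨i, hi, hx⟩)
      · rcases Bool.or_eq_true_iff.mp hc with h1 | h2
        · exact Or.inr ⟨0, by simp, by
            have := (cpk_toList_eq_iff x (p ++ [c])).mp (by exact beq_iff_eq.mp h1)
            simpa using this⟩
        · exact Or.inl h2
      · refine Or.inr ⟨i + 1, by simpa using hi, ?_⟩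
        simpa using hx
    · rintro (hd | ⟨i, hi, hx⟩)
      · exact Or.inl (by simp [hd])
      · cases i with
        | zero =>
          refine Or.inl (Bool.or_eq_true_iff.mpr (Or.inl ?_))
          exact beq_iff_eq.mpr ((cpk_toList_eq_iff x (p ++ [c])).mpr (by simpa using hx))
        | succ j =>
          refine Or.inr ⟨j, by simp at hi; omega, ?_⟩
          simpa using hx

-- the char-level fold of cpkB_addKey: the values it stores
theorem cpk_fold_getD (s : Int) (x : String) :
    ∀ (cs p : List Char) (d : PySem.Dict String Int),
      ((cs.foldl (cpkB_step s) (p, d)).2).getD x 0 =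
        if d.contains x = true then d.getD x 0
        else if ((cs.foldl (cpkB_step s) (p, d)).2).contains x = true then s
        else 0 := by
  intro cs
  induction cs with
  | nil =>
    intro p d
    by_cases hc : d.contains x = true
    · simp [hc]
    · simp only [List.foldl_nil]
      rw [if_neg hc, if_neg hc]
      exact cpk_getD_of_not_contains (Bool.not_eq_true _ ▸ hc) 0
  | cons c cs ih =>
    intro p d
    rw [List.foldl_cons, cpkB_step_eq]
    set k0 := String.ofList (p ++ [c]) with hk0
    set d' := d.setdefault k0 s with hd'
    rw [ih (p ++ [c]) d']
    by_cases hc : d.contains x = true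
    · have hc' : d'.contains x = true := by
        rw [hd', PySem.Dict.contains_setdefault]; simp [hc]
      rw [if_pos hc', if_pos hc]
      by_cases hx : x = k0
      · subst hx
        rw [hd', PySem.Dict.getD_setdefault_self]
        exact cpk_getD_of_contains hc s 0
      · rw [hd', cpk_getD_setdefault_of_ne d s hx]
    · rw [if_neg hc]
      by_cases hx : x = k0
      · have hc' : d'.contains x = true := by
          rw [hd', PySem.Dict.contains_setdefault]; simp [hx]
        rw [if_pos hc']
        have hcontains : ((cs.foldl (cpkB_step s) (p ++ [c], d')).2).contains x = true := by
          rw [cpk_fold_contains]; exact Or.inl hc'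
        rw [if_pos hcontains]
        subst hx
        rw [hd', PySem.Dict.getD_setdefault_self]
        exact cpk_getD_of_not_contains (by simpa using hc) s
      · have hc' : d'.contains x = false := by
          rw [hd', PySem.Dict.contains_setdefault]
          simp only [Bool.or_eq_false_iff]
          exact ⟨by simpa using hx, by simpa using hc⟩
        rw [cpk_getD_of_not_contains hc' 0, if_neg (by simp [hc'])]

theorem cpk_prefix_iff (l₁ l₂ : List Char) :
    l₁ <+: l₂ ↔ (l₁ = [] ∨ ∃ i < l₂.length, l₁ = l₂.take (i+1)) := by
  constructor
  · intro h
    rcases Nat.eq_zero_or_pos l₁.length with h0 | h0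
    · left; exact List.length_eq_zero_iff.mp h0
    · right
      refine ⟨l₁.length - 1, by have := h.length_le; omega, ?_⟩
      rw [Nat.sub_add_cancel h0]
      exact List.prefix_iff_eq_take.mp h
  · rintro (rfl | ⟨i, hi, rfl⟩)
    · exact List.nil_prefix
    · exact List.take_prefix _ _

theorem cpk_toList_nil_iff (x : String) : x.toList = ([] : List Char) ↔ x = "" := by
  constructor
  · intro h; exact String.toList_inj.mp (by simpa using h)
  · rintro rfl; rfl

theorem cpk_addKey_contains (d : PySem.Dict String Int) (k : String) (s : Int) (x : String) :
    (cpkB_addKey d k s).contains x = true ↔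
      d.contains x = true ∨ PySem.Str.startswith k x = true := by
  unfold cpkB_addKey
  rw [cpk_fold_contains]
  rw [PySem.Dict.contains_setdefault]
  have hsw : PySem.Str.startswith k x = true ↔ x.toList <+: k.toList := by
    simp [PySem.Chars.startswith_iff]
  rw [hsw, cpk_prefix_iff]
  constructor
  · rintro (hc | ⟨i, hi, hx⟩)
    · rcases Bool.or_eq_true_iff.mp hc with h1 | h2
      · exact Or.inr (Or.inl ((cpk_toList_nil_iff x).mpr (beq_iff_eq.mp h1)))
      · exact Or.inl h2
    · exact Or.inr (Or.inr ⟨i, hi, by simpa using hx⟩)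
  · rintro (hd | (hx | ⟨i, hi, hx⟩))
    · exact Or.inl (by simp [hd])
    · exact Or.inl (Bool.or_eq_true_iff.mpr (Or.inl (beq_iff_eq.mpr ((cpk_toList_nil_iff x).mp hx))))
    · exact Or.inr ⟨i, hi, by simpa using hx⟩

theorem cpk_addKey_getD (d : PySem.Dict String Int) (k : String) (s : Int) (x : String) :
    (cpkB_addKey d k s).getD x 0 =
      if d.contains x = true then d.getD x 0
      else if PySem.Str.startswith k x = true then s else 0 := by
  have hmain := cpk_fold_getD s x k.toList [] (d.setdefault "" s)
  unfold cpkB_addKey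
  rw [hmain]
  by_cases hc : d.contains x = true
  · have hc' : (d.setdefault "" s).contains x = true := by
      rw [PySem.Dict.contains_setdefault]; simp [hc]
    rw [if_pos hc', if_pos hc]
    by_cases hx : x = ""
    · subst hx
      rw [PySem.Dict.getD_setdefault_self]
      exact cpk_getD_of_contains hc s 0
    · rw [cpk_getD_setdefault_of_ne d s hx]
  · rw [if_neg hc]
    by_cases hx : x = ""
    · have hc' : (d.setdefault "" s).contains x = true := by
        rw [PySem.Dict.contains_setdefault]; simp [hx]
      rw [if_pos hc']
      subst hx
      rw [PySem.Dict.getD_setdefault_self,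
        cpk_getD_of_not_contains (by simpa using hc) s]
      have hstart : PySem.Str.startswith k "" = true := by
        simp [PySem.Chars.startswith_iff]
      rw [if_pos hstart]
    · have hc' : (d.setdefault "" s).contains x = false := by
        rw [PySem.Dict.contains_setdefault]
        simp only [Bool.or_eq_false_iff]
        exact ⟨by simpa using hx, by simpa using hc⟩
      rw [if_neg (by simp [hc'])]
      by_cases hsw : PySem.Str.startswith k x = true
      · have hcon : ((k.toList.foldl (cpkB_step s) ([], d.setdefault "" s)).2).contains x = true := by
          have := (cpk_addKey_contains d k s x).mpr (Or.inr hsw)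
          unfold cpkB_addKey at this
          exact this
        rw [if_pos hcon, if_pos hsw]
      · have hcon : ((k.toList.foldl (cpkB_step s) ([], d.setdefault "" s)).2).contains x ≠ true := by
          intro hcon
          rcases (cpk_addKey_contains d k s x).mp (by unfold cpkB_addKey; exact hcon) with h | h
          · exact absurd h hc
          · exact hsw h
        rw [if_neg hcon, if_neg hsw]

-- the per-entry value B stores equals A's value for a matched entry
theorem cpk_size_eq_footA_entry (k : String) (fm : List (String × Int)) :
    cpkB_size k fm = if k == "" then 0 else cpkA_lastVal fm := by
  unfold cpkB_size cpkA_lastVal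
  by_cases hk : k = ""
  · simp [hk]
  · cases fm with
    | nil => simp [hk]
    | cons a t => simp [hk]

theorem cpk_index_spec (x : String) :
    ∀ (fpd : List (String × List (String × Int))) (d : PySem.Dict String Int),
      (fpd.foldl (fun d kv => cpkB_addKey d kv.1 (cpkB_size kv.1 kv.2)) d).getD x 0 =
        if d.contains x = true then d.getD x 0 else cpkFootA fpd x := by
  intro fpd
  induction fpd with
  | nil =>
    intro d
    by_cases hc : d.contains x = true
    · simp [hc]
    · rw [List.foldl_nil, if_neg hc]
      unfold cpkFootA
      simp only [List.find?_nil]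
      exact cpk_getD_of_not_contains (by simpa using hc) 0
  | cons kv fpd ih =>
    intro d
    rw [List.foldl_cons, ih]
    by_cases hc : d.contains x = true
    · have hc' : (cpkB_addKey d kv.1 (cpkB_size kv.1 kv.2)).contains x = true :=
        (cpk_addKey_contains ..).mpr (Or.inl hc)
      rw [if_pos hc', if_pos hc, cpk_addKey_getD, if_pos hc]
    · rw [if_neg hc]
      by_cases hsw : PySem.Str.startswith kv.1 x = true
      · have hc' : (cpkB_addKey d kv.1 (cpkB_size kv.1 kv.2)).contains x = true :=
          (cpk_addKey_contains ..).mpr (Or.inr hsw)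
        rw [if_pos hc', cpk_addKey_getD, if_neg hc, if_pos hsw]
        unfold cpkFootA
        rw [List.find?_cons_of_pos (by simpa using hsw)]
        exact cpk_size_eq_footA_entry kv.1 kv.2
      · have hc' : (cpkB_addKey d kv.1 (cpkB_size kv.1 kv.2)).contains x ≠ true := by
          intro hcon
          rcases (cpk_addKey_contains ..).mp hcon with h | h
          · exact absurd h hc
          · exact hsw h
        rw [if_neg hc']
        unfold cpkFootA
        rw [List.find?_cons_of_neg (by simpa using hsw)]

theorem cpk_index_getD (fpd : List (String × List (String × Int))) (x : String) :
    (cpkB_index fpd).getD x 0 = cpkFootA fpd x := by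
  unfold cpkB_index
  rw [cpk_index_spec]
  simp [PySem.Dict.contains_empty]

theorem cpk_any_eq_isSome_find? {α : Type} (l : List α) (p : α → Bool) :
    l.any p = (l.find? p).isSome := by
  induction l with
  | nil => rfl
  | cons a t ih =>
    simp only [List.any_cons, List.find?]
    cases p a <;> simp [ih]

theorem cpk_max_eq (a b : Int) : max a b = if b > a then b else a := by
  rw [max_def]; split_ifs <;> omega

-- ===== VERDICT (by name: the statement is the Claim_ definition above) =====
theorem calculate_peak_memory_for_statements_spec : Claim_equal_calculate_peak_memory_for_statements := by
  intro statements live_vars_data func_footprints_data stmt_to_idx_map _ _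
  unfold Spec_calculate_peak_memory_for_statements
  unfold calculate_peak_memory_for_statements calculate_peak_memory_for_statements_alt
  dsimp only
  refine List.foldl_ext _ _ 0 (fun peak stmt _ => ?_)
  dsimp only
  rw [cpk_index_getD, cpk_any_eq_isSome_find?, Option.isSome_map, cpk_max_eq]
  by_cases hfind : (stmt_to_idx_map.find? fun p => p.1 == stmt).isSome = true
  · rw [if_pos hfind, if_pos hfind]
    rfl
  · rw [if_neg hfind, if_neg hfind]
    simp
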